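-- pv_equiv track=rewrite | github.com/EricBouwers/adventofcode | 2021/15/solve.py | enlarge_cave_map
-- ===== SOURCE A (Python) =====
-- def enlarge_cave_map(cave_map, s):
--     new_y_cave_map = {}
--     for c in cave_map:
--         for d in range(0, 5):
--             new_value = cave_map[c] + d
--             new_value = (new_value % 9) if new_value > 9 else new_value
--             new_y_cave_map[(c[0] + d * s, c[1])] = new_value
--
--     new_cave_map = {}
--     for c in new_y_cave_map:
--         for d in range(0, 5):
--             new_value = new_y_cave_map[c] + d
--             new_value = (new_value % 9) if new_value > 9 else new_value
--             new_cave_map[(c[0], c[1] + d * s)] = new_value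
--
--     return new_cave_map
-- ===== SOURCE B (Python) =====
-- def enlarge_cave_map(cave_map, s):
--     def wrap(v):
--         return v % 9 if v > 9 else v
--     return {(x + dx * s, y + dy * s): wrap(wrap(v + dx) + dy)
--             for (x, y), v in cave_map.items()
--             for dx in range(5)
--             for dy in range(5)}
-- ===== Notes on version B (the rewrite author's own statement) =====
-- stated objective: simpler
-- what changed: a single dict comprehension writes all 25 tiled copies of each original cell directly into the result, instead of A's two staged loops that build an intermediate x-expanded dict and then expand it along y
import Mathlib
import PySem

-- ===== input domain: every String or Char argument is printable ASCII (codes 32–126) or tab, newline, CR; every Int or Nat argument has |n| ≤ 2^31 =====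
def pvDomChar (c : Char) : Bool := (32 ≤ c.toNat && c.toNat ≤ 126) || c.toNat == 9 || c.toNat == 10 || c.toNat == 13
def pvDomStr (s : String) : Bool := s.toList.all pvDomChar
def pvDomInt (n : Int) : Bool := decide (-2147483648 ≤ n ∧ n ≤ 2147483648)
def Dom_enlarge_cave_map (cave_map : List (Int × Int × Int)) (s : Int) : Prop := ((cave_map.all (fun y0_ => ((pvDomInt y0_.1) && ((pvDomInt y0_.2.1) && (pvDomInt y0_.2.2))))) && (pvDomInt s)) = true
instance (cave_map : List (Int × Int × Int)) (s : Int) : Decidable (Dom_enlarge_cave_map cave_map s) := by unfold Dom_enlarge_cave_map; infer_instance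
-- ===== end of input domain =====

-- B replaces A's two staged expansion loops (intermediate x-expanded dict, then y-expansion)
-- by one dict comprehension writing all 25 tiled copies of each cell directly; objective: simpler.


-- the wrap expression 'v % 9 if v > 9 else v' both Pythons contain verbatim
def pvWrap (v : Int) : Int := if v > 9 then PySem.Int.mod v 9 else v

-- ===== PORT A =====
def enlarge_cave_map (cave_map : List (Int × Int × Int)) (s : Int) : List (Int × Int × Int) :=
  -- first pass: expand along x into the intermediate dict new_y_cave_map
  let new_y_cave_map : PySem.Dict (Int × Int) Int :=
    cave_map.foldl (fun acc c =>
      (PySem.List.pyRange 0 5 1).foldl (fun acc d =>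
        acc.insert (c.1 + d * s, c.2.1) (pvWrap (c.2.2 + d))) acc)
      PySem.Dict.empty
  -- second pass: expand the intermediate dict along y
  let new_cave_map : PySem.Dict (Int × Int) Int :=
    new_y_cave_map.items.foldl (fun acc c =>
      (PySem.List.pyRange 0 5 1).foldl (fun acc d =>
        acc.insert (c.1.1, c.1.2 + d * s) (pvWrap (c.2 + d))) acc)
      PySem.Dict.empty
  new_cave_map.items.map (fun p => (p.1.1, p.1.2, p.2))

-- ===== PORT B =====
def enlarge_cave_map_alt (cave_map : List (Int × Int × Int)) (s : Int) : List (Int × Int × Int) :=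
  -- the dict comprehension: the generated (key, value) stream, collected into a dict
  (PySem.Dict.ofList
    (cave_map.flatMap (fun t =>
      (PySem.List.pyRange 0 5 1).flatMap (fun dx =>
        (PySem.List.pyRange 0 5 1).map (fun dy =>
          ((t.1 + dx * s, t.2.1 + dy * s),
           pvWrap (pvWrap (t.2.2 + dx) + dy))))))).items.map (fun p => (p.1.1, p.1.2, p.2))

-- ===== PRECONDITION & SPEC =====
-- all 25n target coordinates of the expansion (a pure shape function of the input, no values)
def pvKeys (cave_map : List (Int × Int × Int)) (s : Int) : List (Int × Int) :=
  cave_map.flatMap (fun t =>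
    (PySem.List.pyRange 0 5 1).flatMap (fun dx =>
      (PySem.List.pyRange 0 5 1).map (fun dy => (t.1 + dx * s, t.2.1 + dy * s))))

-- Pre_ excludes inputs whose 25n expanded target coordinates collide (impossible for the intended
-- s×s grid input): there A's per-key overwrite order in the intermediate dict is accidental.
def Pre_enlarge_cave_map (cave_map : List (Int × Int × Int)) (s : Int) : Prop :=
  (pvKeys cave_map s).Nodup
instance (cave_map : List (Int × Int × Int)) (s : Int) : Decidable (Pre_enlarge_cave_map cave_map s) := by unfold Pre_enlarge_cave_map; infer_instance

def pvWitness_enlarge_cave_map : (List (Int × Int × Int)) × Int :=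
  ([(0, 0, 1), (0, 1, 8), (1, 0, 3), (1, 1, 9)], 2)

def Spec_enlarge_cave_map (cave_map : List (Int × Int × Int)) (s : Int) (out : List (Int × Int × Int)) : Prop := out = enlarge_cave_map_alt cave_map s
instance (cave_map : List (Int × Int × Int)) (s : Int) (out : List (Int × Int × Int)) : Decidable (Spec_enlarge_cave_map cave_map s out) := by unfold Spec_enlarge_cave_map; infer_instance

-- ===== CLAIM (what is proved, stated in full; the proofs are below) =====
def Claim_equal_enlarge_cave_map : Prop := ∀ (cave_map : List (Int × Int × Int)) (s : Int), Dom_enlarge_cave_map cave_map s → Pre_enlarge_cave_map cave_map s → Spec_enlarge_cave_map cave_map s (enlarge_cave_map cave_map s)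

-- ===== LEMMAS AND PROOFS =====

-- the flat (key, value) list B's comprehension generates
def pvPairs (cave_map : List (Int × Int × Int)) (s : Int) : List ((Int × Int) × Int) :=
  cave_map.flatMap (fun t =>
    (PySem.List.pyRange 0 5 1).flatMap (fun dx =>
      (PySem.List.pyRange 0 5 1).map (fun dy =>
        ((t.1 + dx * s, t.2.1 + dy * s), pvWrap (pvWrap (t.2.2 + dx) + dy)))))

lemma pvPairs_fst (cave_map : List (Int × Int × Int)) (s : Int) :
    (pvPairs cave_map s).map Prod.fst = pvKeys cave_map s := by
  simp [pvPairs, pvKeys, List.map_flatMap, List.map_map, Function.comp_def]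

-- B's dict is the fold of insert over pvPairs (Dict.ofList unfolds to that fold)
lemma alt_ofList_eq (cave_map : List (Int × Int × Int)) (s : Int) :
    (PySem.Dict.ofList (pvPairs cave_map s) : PySem.Dict (Int × Int) Int)
    = (pvPairs cave_map s).foldl (fun d p => d.insert p.1 p.2) PySem.Dict.empty := rfl

-- A's first pass is the fold of insert over its flat pair list
def pvPairs1 (cave_map : List (Int × Int × Int)) (s : Int) : List ((Int × Int) × Int) :=
  cave_map.flatMap (fun t =>
    (PySem.List.pyRange 0 5 1).map (fun dx => ((t.1 + dx * s, t.2.1), pvWrap (t.2.2 + dx))))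

lemma passA1_eq (cave_map : List (Int × Int × Int)) (s : Int) :
    (cave_map.foldl (fun acc c =>
      (PySem.List.pyRange 0 5 1).foldl (fun acc d =>
        acc.insert (c.1 + d * s, c.2.1) (pvWrap (c.2.2 + d))) acc)
      (PySem.Dict.empty : PySem.Dict (Int × Int) Int))
    = (pvPairs1 cave_map s).foldl (fun d p => d.insert p.1 p.2) PySem.Dict.empty := by
  simp only [pvPairs1, List.foldl_flatMap, List.foldl_map]

-- the first-pass keys form a sublist of pvKeys (each is the dy = 0 head of its 5-block)
lemma pairs1_fst_sublist (cave_map : List (Int × Int × Int)) (s : Int) :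
    ((pvPairs1 cave_map s).map Prod.fst).Sublist (pvKeys cave_map s) := by
  have h : (pvPairs1 cave_map s).map Prod.fst
      = cave_map.flatMap (fun t =>
          (PySem.List.pyRange 0 5 1).flatMap (fun dx => [(t.1 + dx * s, t.2.1)])) := by
    simp [pvPairs1, List.map_eq_flatMap, List.flatMap_assoc]
  rw [h]
  refine List.Sublist.flatMap_right _ (fun t _ => ?_)
  refine List.Sublist.flatMap_right _ (fun dx _ => ?_)
  have hr : PySem.List.pyRange 0 5 1 = [0, 1, 2, 3, 4] := by decide
  rw [hr]
  simp [List.map_cons]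

-- chaining the second pass over pvPairs1 yields exactly pvPairs
lemma pairs1_expand (cave_map : List (Int × Int × Int)) (s : Int) :
    (pvPairs1 cave_map s).flatMap (fun c =>
      (PySem.List.pyRange 0 5 1).map (fun d => ((c.1.1, c.1.2 + d * s), pvWrap (c.2 + d))))
    = pvPairs cave_map s := by
  simp [pvPairs1, pvPairs, List.flatMap_assoc, List.flatMap_map]

-- folding insert over a pair list with distinct keys from empty yields exactly that list
lemma items_fold_pairs (l : List ((Int × Int) × Int)) (h : (l.map Prod.fst).Nodup) :
    ((l.foldl (fun d p => d.insert p.1 p.2) PySem.Dict.empty : PySem.Dict (Int × Int) Int)).items = l := by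
  have := PySem.Dict.items_foldl_insert_fresh l Prod.fst Prod.snd PySem.Dict.empty
    (fun a _ => by simp [pysem]) h
  simpa using this

-- A's second pass over a plain pair list is the fold of insert over its flat expansion
lemma passA2_eq (l : List ((Int × Int) × Int)) (s : Int) :
    (l.foldl (fun acc c =>
      (PySem.List.pyRange 0 5 1).foldl (fun acc d =>
        acc.insert (c.1.1, c.1.2 + d * s) (pvWrap (c.2 + d))) acc)
      (PySem.Dict.empty : PySem.Dict (Int × Int) Int))
    = (l.flatMap (fun c =>
        (PySem.List.pyRange 0 5 1).map (fun d => ((c.1.1, c.1.2 + d * s), pvWrap (c.2 + d))))).foldl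
          (fun d p => d.insert p.1 p.2) PySem.Dict.empty := by
  simp only [List.foldl_flatMap, List.foldl_map]

-- ===== VERDICT (by name: the statement is the Claim_ definition above) =====
theorem enlarge_cave_map_spec : Claim_equal_enlarge_cave_map := by
  intro cave_map s _ hpre
  unfold Spec_enlarge_cave_map enlarge_cave_map enlarge_cave_map_alt
  have hk : ((pvPairs cave_map s).map Prod.fst).Nodup := by
    rw [pvPairs_fst]; exact hpre
  have h1 : ((pvPairs1 cave_map s).map Prod.fst).Nodup :=
    hpre.sublist (pairs1_fst_sublist cave_map s)
  show _ = (PySem.Dict.ofList (pvPairs cave_map s)).items.map _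
  rw [alt_ofList_eq]
  simp only [passA1_eq, items_fold_pairs _ h1, passA2_eq, pairs1_expand,
    items_fold_pairs _ hk]
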